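-- pv_equiv track=rewrite | github.com/DragunWF/Competitive-Programming | CodeWars/python/6_kyu/simple_frequency_sort.py | solve
-- ===== SOURCE A (Python) =====
-- from collections import Counter
--
-- def solve(arr: list[int]) -> list[int]:
--     counter = Counter(arr)
--     order = [key for key in counter]
--     for i in range(len(order) - 1):
--         for j in range(len(order) - 1):
--             if (counter[order[j]] == counter[order[j + 1]] and order[j] > order[j + 1]) or counter[order[j]] < counter[order[j + 1]]:
--                 order[j + 1], order[j] = order[j], order[j + 1]
--
--     output = []
--     for key in order:
--         for i in range(counter[key]):
--             output.append(key)
--     return output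
-- ===== SOURCE B (Python) =====
-- from collections import Counter
--
-- def solve(arr: list[int]) -> list[int]:
--     counter = Counter(arr)
--     buckets = {}
--     for v, f in counter.items():
--         buckets.setdefault(f, []).append(v)
--     maxf = max(counter.values(), default=0)
--     output = []
--     for f in range(maxf, 0, -1):
--         for v in sorted(buckets.get(f, [])):
--             output += [v] * f
--     return output
-- ===== Notes on version B (the rewrite author's own statement) =====
-- stated objective: faster
-- what changed: Replaces A's O(k^2) hand-written bubble sort of the distinct keys on (-count, value) by a frequency-indexed bucket table walked from the maximum count downward, sorting each bucket ascending and expanding in one pass.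
import Mathlib
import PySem

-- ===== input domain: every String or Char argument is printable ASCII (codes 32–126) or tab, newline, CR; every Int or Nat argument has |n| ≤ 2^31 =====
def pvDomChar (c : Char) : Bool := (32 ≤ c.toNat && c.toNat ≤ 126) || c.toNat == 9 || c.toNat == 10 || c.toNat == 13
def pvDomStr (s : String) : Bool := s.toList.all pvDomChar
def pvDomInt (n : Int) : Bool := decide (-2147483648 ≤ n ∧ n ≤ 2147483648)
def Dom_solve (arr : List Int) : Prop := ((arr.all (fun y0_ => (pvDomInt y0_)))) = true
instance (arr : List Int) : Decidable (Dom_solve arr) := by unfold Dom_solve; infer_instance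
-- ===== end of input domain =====

-- B replaces A's quadratic bubble sort of the distinct keys by a count-indexed bucket
-- table walked from the maximum count downward (objective: faster; measured by the check).

-- ===== PORT A =====
-- one inner-loop body: compare order[j] / order[j+1], swap if out of order
def solveStep (counter : PySem.Dict Int Int) (ord : List Int) (j : Int) : List Int :=
  let a := PySem.List.pyGetD ord j 0
  let b := PySem.List.pyGetD ord (j + 1) 0
  if (counter.getD a 0 == counter.getD b 0 && decide (a > b)) || decide (counter.getD a 0 < counter.getD b 0) then
    PySem.List.pySetD (PySem.List.pySetD ord (j + 1) a) j b
  else ord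

def solve (arr : List Int) : List Int :=
  let counter := PySem.Dict.counter arr
  let order0 := counter.keys
  let order :=
    (PySem.List.pyRange 0 ((order0.length : Int) - 1) 1).foldl
      (fun ord _i =>
        (PySem.List.pyRange 0 ((ord.length : Int) - 1) 1).foldl (solveStep counter) ord)
      order0
  order.foldl
    (fun output key =>
      (PySem.List.pyRange 0 (counter.getD key 0) 1).foldl (fun out _i => out ++ [key]) output)
    []

-- ===== PORT B =====
def solve_alt (arr : List Int) : List Int :=
  let counter := PySem.Dict.counter arr
  let buckets :=
    counter.items.foldl
      (fun (b : PySem.Dict Int (List Int)) vf => b.insert vf.2 (b.getD vf.2 [] ++ [vf.1]))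
      PySem.Dict.empty
  let maxf := (PySem.List.max? counter.values (fun y => y)).getD 0
  (PySem.List.pyRange maxf 0 (-1)).foldl
    (fun output f =>
      (PySem.List.sorted (buckets.getD f []) (fun x => x) false).foldl
        (fun out v => out ++ List.replicate f.toNat v) output)
    []

-- ===== PRECONDITION & SPEC =====
def Spec_solve (arr : List Int) (out : List Int) : Prop := out = solve_alt arr
instance (arr : List Int) (out : List Int) : Decidable (Spec_solve arr out) := by unfold Spec_solve; infer_instance

-- ===== CLAIM (what is proved, stated in full; the proofs are below) =====
def Claim_equal_solve : Prop := ∀ (arr : List Int), Dom_solve arr → Spec_solve arr (solve arr)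

-- ===== LEMMAS AND PROOFS =====

def ble (c : Int → Int) (a b : Int) : Prop := c b < c a ∨ (c a = c b ∧ a ≤ b)

def bswap (c : Int → Int) (a b : Int) : Bool :=
  (c a == c b && decide (a > b)) || decide (c a < c b)

def passAux (c : Int → Int) : Int → List Int → List Int
  | x, [] => [x]
  | x, b :: t => if bswap c x b then b :: passAux c x t else x :: passAux c b t

def pass (c : Int → Int) : List Int → List Int
  | [] => []
  | x :: t => passAux c x t

theorem bswap_false_iff (c : Int → Int) (a b : Int) : bswap c a b = false ↔ ble c a b := by
  simp [bswap, ble]; omega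

theorem ble_of_bswap_true (c : Int → Int) {a b : Int} (h : bswap c a b = true) : ble c b a := by
  simp [bswap, ble] at h ⊢; omega

theorem ble_trans {c : Int → Int} {a b d : Int} (h1 : ble c a b) (h2 : ble c b d) : ble c a d := by
  unfold ble at *; omega

theorem ble_antisymm {c : Int → Int} {a b : Int} (h1 : ble c a b) (h2 : ble c b a) : a = b := by
  unfold ble at *; omega

theorem passAux_perm (c : Int → Int) (t : List Int) : ∀ x, (passAux c x t).Perm (x :: t) := by
  induction t with
  | nil => intro x; simp [passAux]
  | cons b t ih =>
    intro x
    by_cases h : bswap c x b = true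
    · simp only [passAux, h, if_pos]
      exact ((ih x).cons b).trans (List.Perm.swap x b t)
    · simp only [passAux, if_neg h]
      exact (ih b).cons x

theorem pass_perm (c : Int → Int) (l : List Int) : (pass c l).Perm l := by
  cases l with
  | nil => exact List.Perm.refl _
  | cons x t => exact passAux_perm c t x

theorem passAux_sorted_id (c : Int → Int) (t : List Int) : ∀ x, (x :: t).Pairwise (ble c) → passAux c x t = x :: t := by
  induction t with
  | nil => intro x _; rfl
  | cons b t ih =>
    intro x h
    have hxb : ble c x b := (List.pairwise_cons.mp h).1 b (by simp)
    have hs : bswap c x b = false := (bswap_false_iff c x b).mpr hxb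
    simp only [passAux, hs, Bool.false_eq_true, ite_false]
    rw [ih b (List.pairwise_cons.mp h).2]

theorem passAux_append (c : Int → Int) (t : List Int) :
    ∀ x s, (∀ a ∈ x :: t, ∀ b ∈ s, ble c a b) → s.Pairwise (ble c) →
    passAux c x (t ++ s) = passAux c x t ++ s := by
  induction t with
  | nil =>
    intro x s hdom hs
    cases s with
    | nil => rfl
    | cons b s' =>
      have hxb : ble c x b := hdom x (by simp) b (by simp)
      have hb : bswap c x b = false := (bswap_false_iff c x b).mpr hxb
      simp only [List.nil_append, passAux, hb, Bool.false_eq_true, ite_false]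
      rw [passAux_sorted_id c s' b hs]; simp
  | cons d t ih =>
    intro x s hdom hs
    have h1 : ∀ a ∈ x :: t, ∀ b ∈ s, ble c a b := by
      intro a ha; apply hdom; simp at ha ⊢; tauto
    have h2 : ∀ a ∈ d :: t, ∀ b ∈ s, ble c a b := by
      intro a ha; apply hdom; simp at ha ⊢; tauto
    simp only [List.cons_append, passAux]
    by_cases h : bswap c x d = true
    · simp [h, ih x s h1 hs]
    · simp [h, ih d s h2 hs]

theorem passAux_max (c : Int → Int) (t : List Int) :
    ∀ x, ∃ f M, passAux c x t = f ++ [M] ∧ ∀ y ∈ x :: t, ble c y M := by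
  induction t with
  | nil =>
    intro x
    exact ⟨[], x, rfl, by intro y hy; simp at hy; subst hy; exact Or.inr ⟨rfl, le_rfl⟩⟩
  | cons b t ih =>
    intro x
    by_cases h : bswap c x b = true
    · obtain ⟨f, M, hf, hM⟩ := ih x
      refine ⟨b :: f, M, by simp [passAux, h, hf], ?_⟩
      intro y hy
      rcases List.mem_cons.mp hy with rfl | hy
      · exact hM y (by simp)
      · rcases List.mem_cons.mp hy with rfl | hy
        · exact ble_trans (ble_of_bswap_true c h) (hM x (by simp))
        · exact hM y (by simp [hy])
    · obtain ⟨f, M, hf, hM⟩ := ih b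
      refine ⟨x :: f, M, by simp [passAux, h, hf], ?_⟩
      intro y hy
      rcases List.mem_cons.mp hy with rfl | hy
      · have hxb : ble c y b := (bswap_false_iff c y b).mp (Bool.not_eq_true _ ▸ h)
        exact ble_trans hxb (hM b (by simp))
      · exact hM y hy

theorem pass_append_max (c : Int → Int) (f : List Int) (M : Int)
    (h : ∀ a ∈ f, ble c a M) : pass c (f ++ [M]) = pass c f ++ [M] := by
  cases f with
  | nil => rfl
  | cons x t =>
    show passAux c x (t ++ [M]) = passAux c x t ++ [M]
    exact passAux_append c t x [M] (fun a ha b hb => by simp at hb; subst hb; exact h a ha)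
      (by simp)

theorem iterate_pass_append_max (c : Int → Int) (n : Nat) :
    ∀ (f : List Int) (M : Int), (∀ a ∈ f, ble c a M) →
    (pass c)^[n] (f ++ [M]) = (pass c)^[n] f ++ [M] := by
  induction n with
  | zero => intro f M _; rfl
  | succ n ih =>
    intro f M h
    rw [Function.iterate_succ_apply, Function.iterate_succ_apply,
      pass_append_max c f M h]
    exact ih (pass c f) M (fun a ha => h a ((pass_perm c f).mem_iff.mp ha))

theorem iterate_pass_perm (c : Int → Int) (n : Nat) (l : List Int) :
    ((pass c)^[n] l).Perm l := by
  induction n generalizing l with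
  | zero => exact List.Perm.refl _
  | succ n ih => rw [Function.iterate_succ_apply]; exact (ih (pass c l)).trans (pass_perm c l)

theorem iterate_pass_sorted (c : Int → Int) (n : Nat) :
    ∀ l : List Int, l.length ≤ n + 1 → ((pass c)^[n] l).Pairwise (ble c) := by
  induction n with
  | zero =>
    intro l hl
    match l, hl with
    | [], _ => exact List.Pairwise.nil
    | [x], _ => simpa using List.pairwise_singleton (ble c) x
  | succ n ih =>
    intro l hl
    cases l with
    | nil =>
      have : (pass c)^[n+1] ([] : List Int) = [] :=
        List.length_eq_zero_iff.mp (by simpa using (iterate_pass_perm c (n+1) []).length_eq)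
      rw [this]; exact List.Pairwise.nil
    | cons x t =>
      rw [Function.iterate_succ_apply]
      obtain ⟨f, M, hf, hM⟩ := passAux_max c t x
      have hpass : pass c (x :: t) = f ++ [M] := hf
      rw [hpass]
      have hfmem : ∀ a ∈ f, ble c a M := by
        intro a ha
        have : a ∈ x :: t := (hf ▸ passAux_perm c t x).mem_iff.mp (by simp [ha])
        exact hM a this
      rw [iterate_pass_append_max c n f M hfmem]
      have hflen : f.length ≤ n + 1 := by
        have h1 : (f ++ [M]).length = (x :: t).length := (hf ▸ passAux_perm c t x).length_eq
        simp at h1 hl ⊢; omega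
      refine (List.pairwise_append).mpr ⟨ih f hflen, by simp, ?_⟩
      intro a ha b hb
      simp at hb; subst hb
      exact hfmem a ((iterate_pass_perm c n f).mem_iff.mp ha)

theorem getD_append_len (pre : List Int) (x : Int) (t : List Int) (d : Int) :
    (pre ++ x :: t).getD pre.length d = x := by
  induction pre with
  | nil => rfl
  | cons p pre ih => simpa using ih

theorem set_append_len (pre : List Int) (v x : Int) (t : List Int) :
    (pre ++ x :: t).set pre.length v = pre ++ v :: t := by
  induction pre with
  | nil => rfl
  | cons p pre ih => simpa using ih

theorem inner_fold (counter : PySem.Dict Int Int) (t : List Int) :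
    ∀ (pre : List Int) (x : Int),
    (PySem.List.pyRange (pre.length) ((pre.length : Int) + t.length) 1).foldl
        (solveStep counter) (pre ++ x :: t)
      = pre ++ passAux (fun k => counter.getD k 0) x t := by
  induction t with
  | nil =>
    intro pre x
    rw [PySem.List.pyRange_one_eq_nil (by simp)]
    rfl
  | cons b t ih =>
    intro pre x
    have hlt : (pre.length : Int) < (pre.length : Int) + (b :: t).length := by
      simp
    rw [PySem.List.pyRange_one_cons hlt, List.foldl_cons]
    have hget1 : PySem.List.pyGetD (pre ++ x :: b :: t) (pre.length : Int) 0 = x := by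
      rw [PySem.List.pyGetD_natCast, getD_append_len]
    have hget2 : PySem.List.pyGetD (pre ++ x :: b :: t) ((pre.length : Int) + 1) 0 = b := by
      have : ((pre.length : Int) + 1) = (((pre ++ [x]).length : Nat) : Int) := by simp
      rw [this, PySem.List.pyGetD_natCast]
      have : pre ++ x :: b :: t = (pre ++ [x]) ++ b :: t := by simp
      rw [this, getD_append_len]
    by_cases hsw : bswap (fun k => counter.getD k 0) x b = true
    · have hstep : solveStep counter (pre ++ x :: b :: t) (pre.length : Int)
          = (pre ++ [b]) ++ x :: t := by
        unfold solveStep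
        rw [hget1, hget2]
        rw [if_pos (by simpa [bswap] using hsw)]
        rw [PySem.List.pySetD_natCast (n := pre.length)]
        have h1 : ((pre.length : Int) + 1) = (((pre ++ [x]).length : Nat) : Int) := by simp
        rw [h1, PySem.List.pySetD_natCast]
        have h2 : pre ++ x :: b :: t = (pre ++ [x]) ++ b :: t := by simp
        rw [h2, set_append_len]
        have h3 : (pre ++ [x]) ++ x :: t = pre ++ x :: x :: t := by simp
        rw [h3, set_append_len]
        simp
      rw [hstep]
      have harr : (pre.length : Int) + 1 = ((pre ++ [b]).length : Int) := by simp
      have harr2 : (pre.length : Int) + ((b :: t).length : Int)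
          = ((pre ++ [b]).length : Int) + (t.length : Int) := by simp; omega
      rw [harr, harr2, ih (pre ++ [b]) x]
      simp [passAux, hsw]
    · have hstep : solveStep counter (pre ++ x :: b :: t) (pre.length : Int)
          = (pre ++ [x]) ++ b :: t := by
        unfold solveStep
        rw [hget1, hget2]
        rw [if_neg (by simpa [bswap] using hsw)]
        simp
      rw [hstep]
      have harr : (pre.length : Int) + 1 = ((pre ++ [x]).length : Int) := by simp
      have harr2 : (pre.length : Int) + ((b :: t).length : Int)
          = ((pre ++ [x]).length : Int) + (t.length : Int) := by simp; omega
      rw [harr, harr2, ih (pre ++ [x]) b]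
      simp [passAux, hsw]

theorem inner_loop (counter : PySem.Dict Int Int) (l : List Int) :
    (PySem.List.pyRange 0 ((l.length : Int) - 1) 1).foldl (solveStep counter) l
      = pass (fun k => counter.getD k 0) l := by
  cases l with
  | nil =>
    rw [PySem.List.pyRange_one_eq_nil (by norm_num)]
    rfl
  | cons x t =>
    have h := inner_fold counter t [] x
    simp only [List.nil_append, List.length_nil, Nat.cast_zero, Int.zero_add] at h
    have h1 : ((x :: t).length : Int) - 1 = (t.length : Int) := by simp
    rw [h1, h]
    rfl

theorem outer_fold (counter : PySem.Dict Int Int) (is : List Int) :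
    ∀ l : List Int,
    is.foldl (fun ord _i =>
        (PySem.List.pyRange 0 ((ord.length : Int) - 1) 1).foldl (solveStep counter) ord) l
      = (pass (fun k => counter.getD k 0))^[is.length] l := by
  induction is with
  | nil => intro l; rfl
  | cons i is ih =>
    intro l
    rw [List.foldl_cons, ih, inner_loop, List.length_cons]
    exact (Function.iterate_succ_apply _ _ _).symm

theorem buckets_getD (l : List (Int × Int)) :
    ∀ (d : PySem.Dict Int (List Int)) (f : Int),
    (l.foldl (fun b vf => b.insert vf.2 (b.getD vf.2 [] ++ [vf.1])) d).getD f []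
      = d.getD f [] ++ (l.filter (fun vf => vf.2 == f)).map (·.1) := by
  induction l with
  | nil => intro d f; simp
  | cons vf l ih =>
    intro d f
    rw [List.foldl_cons, ih]
    by_cases h : vf.2 = f
    · subst h
      rw [PySem.Dict.getD_insert_self]
      simp
    · rw [PySem.Dict.getD_insert_of_ne _ _ _ (Ne.symm h)]
      simp [h]

theorem flatMap_congr_mem {α β : Type} (l : List α) (f g : α → List β)
    (h : ∀ x ∈ l, f x = g x) : l.flatMap f = l.flatMap g := by
  induction l with
  | nil => rfl
  | cons x l ih =>
    simp only [List.flatMap_cons, h x (by simp)]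
    rw [ih (fun y hy => h y (by simp [hy]))]

theorem perm_flatMap_congr {α β : Type} (l : List α) (f g : α → List β)
    (h : ∀ x ∈ l, (f x).Perm (g x)) : (l.flatMap f).Perm (l.flatMap g) := by
  induction l with
  | nil => exact List.Perm.refl _
  | cons x l ih =>
    simp only [List.flatMap_cons]
    exact (h x (by simp)).append (ih (fun y hy => h y (by simp [hy])))

theorem flatMap_filter_cons (cnt : Int → Int) (k : Int) (S : List Int) (fs : List Int)
    (hnd : fs.Nodup) (hk : cnt k ∈ fs) :
    (fs.flatMap (fun f => (k :: S).filter (fun x => cnt x == f))).Perm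
      (k :: fs.flatMap (fun f => S.filter (fun x => cnt x == f))) := by
  induction fs with
  | nil => simp at hk
  | cons f fs ih =>
    simp only [List.flatMap_cons]
    by_cases h : cnt k = f
    · subst h
      have hnotin : cnt k ∉ fs := (List.nodup_cons.mp hnd).1
      have hrest : fs.flatMap (fun f => (k :: S).filter (fun x => cnt x == f))
          = fs.flatMap (fun f => S.filter (fun x => cnt x == f)) := by
        apply flatMap_congr_mem
        intro f' hf'
        have : cnt k ≠ f' := fun he => hnotin (he ▸ hf')
        simp [this]
      rw [hrest, List.filter_cons_of_pos (by simp)]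
      exact List.Perm.refl _
    · rw [List.filter_cons_of_neg (by simp [h])]
      have := ih (List.nodup_cons.mp hnd).2 (by rcases List.mem_cons.mp hk with h' | h'; exact absurd h' h; exact h')
      exact (this.append_left _).trans (List.perm_middle)

theorem flatMap_buckets_perm (cnt : Int → Int) (S : List Int) (fs : List Int)
    (hnd : fs.Nodup) (h : ∀ k ∈ S, cnt k ∈ fs) :
    (fs.flatMap (fun f => S.filter (fun x => cnt x == f))).Perm S := by
  induction S with
  | nil => simp
  | cons k S ih =>
    exact (flatMap_filter_cons cnt k S fs hnd (h k (by simp))).trans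
      ((ih (fun y hy => h y (by simp [hy]))).cons k)

theorem pairwise_flatMap {α : Type} {R : Int → Int → Prop} (fs : List α) (g : α → List Int)
    (h1 : ∀ f ∈ fs, (g f).Pairwise R)
    (h2 : fs.Pairwise (fun f f' => ∀ a ∈ g f, ∀ b ∈ g f', R a b)) :
    (fs.flatMap g).Pairwise R := by
  induction fs with
  | nil => exact List.Pairwise.nil
  | cons f fs ih =>
    simp only [List.flatMap_cons]
    refine List.pairwise_append.mpr ⟨h1 f (by simp), ih (fun y hy => h1 y (by simp [hy]))
      (List.pairwise_cons.mp h2).2, ?_⟩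
    intro a ha b hb
    obtain ⟨f', hf', hbf'⟩ := List.mem_flatMap.mp hb
    exact (List.pairwise_cons.mp h2).1 f' hf' a ha b hbf'

theorem flatMap_assoc {α β γ : Type} (l : List α) (h : α → List β) (g : β → List γ) :
    (l.flatMap h).flatMap g = l.flatMap (fun x => (h x).flatMap g) := by
  induction l with
  | nil => rfl
  | cons x l ih => simp only [List.flatMap_cons, List.flatMap_append, ih]

theorem expand_fold (c : Int → Int) (O : List Int) :
    O.foldl (fun output key =>
        (PySem.List.pyRange 0 (c key) 1).foldl (fun out _i => out ++ [key]) output) []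
      = O.flatMap (fun k => List.replicate (c k).toNat k) := by
  have h : (fun (output : List Int) (key : Int) =>
        (PySem.List.pyRange 0 (c key) 1).foldl (fun out _i => out ++ [key]) output)
      = fun output key => output ++ List.replicate (c key).toNat key := by
    funext output key
    rw [PySem.List.foldl_append_singleton_eq_map (fun _ => key)]
    congr 1
    rw [List.map_const']
    congr 1
    rw [PySem.List.length_pyRange_one]
    omega
  rw [h, PySem.List.foldl_append_eq_flatMap (fun k => List.replicate (c k).toNat k)]
  rfl

theorem solve_eq (arr : List Int) : solve arr = solve_alt arr := by
  have hc : (fun k => (PySem.Dict.counter arr).getD k 0)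
      = (fun k => ((arr.count k : Nat) : Int)) := funext (fun k => PySem.Dict.getD_counter arr k)
  set cnt : Int → Int := fun k => ((arr.count k : Nat) : Int) with hcnt
  set S : List Int := PySem.Set.ofList arr with hS
  -- ===== A side =====
  have hA : solve arr
      = ((pass cnt)^[(PySem.List.pyRange 0 ((S.length : Int) - 1) 1).length] S).flatMap
          (fun k => List.replicate (cnt k).toNat k) := by
    simp only [solve]
    rw [outer_fold, expand_fold (fun k => (PySem.Dict.counter arr).getD k 0),
      PySem.Dict.keys_counter, ← hS, hc]
    simp only [PySem.Dict.getD_counter]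
    rfl
  set n : Nat := (PySem.List.pyRange 0 ((S.length : Int) - 1) 1).length with hn
  set O : List Int := (pass cnt)^[n] S with hO
  have hOperm : O.Perm S := iterate_pass_perm cnt n S
  have hOsorted : O.Pairwise (ble cnt) := by
    apply iterate_pass_sorted cnt n S
    rw [hn, PySem.List.length_pyRange_one]
    omega
  -- ===== B side =====
  have hbuck : ∀ f : Int,
      ((PySem.Dict.counter arr).items.foldl
        (fun (b : PySem.Dict Int (List Int)) vf => b.insert vf.2 (b.getD vf.2 [] ++ [vf.1]))
        PySem.Dict.empty).getD f []
      = S.filter (fun x => cnt x == f) := by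
    intro f
    rw [buckets_getD, PySem.Dict.items_counter]
    simp [hcnt, hS, List.filter_map, Function.comp_def]
  set maxf : Int := (PySem.List.max? (PySem.Dict.counter arr).values (fun y => y)).getD 0
    with hmaxf
  set fs : List Int := PySem.List.pyRange maxf 0 (-1) with hfs
  set KB : List Int := fs.flatMap (fun f => PySem.List.sorted (S.filter (fun x => cnt x == f))
    (fun x => x) false) with hKB
  have hB : solve_alt arr = KB.flatMap (fun k => List.replicate (cnt k).toNat k) := by
    simp only [solve_alt]
    have h1 : (fun (output : List Int) (f : Int) =>
        (PySem.List.sorted ((((PySem.Dict.counter arr).items.foldl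
          (fun (b : PySem.Dict Int (List Int)) vf => b.insert vf.2 (b.getD vf.2 [] ++ [vf.1]))
          PySem.Dict.empty)).getD f []) (fun x => x) false).foldl
          (fun out v => out ++ List.replicate f.toNat v) output)
        = fun output f => output ++
            (PySem.List.sorted (S.filter (fun x => cnt x == f)) (fun x => x) false).flatMap
              (fun v => List.replicate (cnt v).toNat v) := by
      funext output f
      rw [hbuck f, PySem.List.foldl_append_eq_flatMap (fun v => List.replicate f.toNat v)]
      congr 1
      apply flatMap_congr_mem
      intro v hv
      have hvf : cnt v = f := by
        have := List.of_mem_filter ((PySem.List.mem_sorted _ _ _ v).mp hv)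
        simpa using this
      rw [hvf]
    rw [h1, PySem.List.foldl_append_eq_flatMap]
    rw [List.nil_append, ← flatMap_assoc]
  -- fs facts
  have hfs_nodup : fs.Nodup := by
    rw [hfs, PySem.List.pyRange_neg_one_eq_reverse, List.nodup_reverse]
    exact PySem.List.nodup_pyRange_one _ _
  have hfs_pairwise : fs.Pairwise (fun f f' => f' < f) := by
    rw [hfs, PySem.List.pyRange_neg_one_eq_reverse, List.pairwise_reverse]
    exact PySem.List.pairwise_lt_pyRange_one _ _
  have hvalues : (PySem.Dict.counter arr).values = S.map cnt := by
    rw [PySem.Dict.values_eq_map_keys _ (PySem.Dict.nodup_keys_counter arr) 0,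
      PySem.Dict.keys_counter, ← hS]
    exact List.map_congr_left (fun k _ => PySem.Dict.getD_counter arr k)
  have hmemfs : ∀ k ∈ S, cnt k ∈ fs := by
    intro k hk
    have hpos : 0 < cnt k := by
      have : k ∈ arr := (PySem.Set.mem_ofList arr k).mp (hS ▸ hk)
      have := List.count_pos_iff.mpr this
      simp [hcnt]; omega
    have hle : cnt k ≤ maxf := by
      have hmem : cnt k ∈ (PySem.Dict.counter arr).values := by
        rw [hvalues]; exact List.mem_map_of_mem hk
      rcases hm : PySem.List.max? (PySem.Dict.counter arr).values (fun y => y) with _ | m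
      · rw [(PySem.List.max?_eq_none_iff _ _).mp hm] at hmem; simp at hmem
      · have := PySem.List.max?_isMax hm (cnt k) hmem
        rw [hmaxf, hm]; simpa using this
    rw [hfs, PySem.List.mem_pyRange_neg_one]
    exact ⟨hpos, hle⟩
  have hKBperm : KB.Perm S := by
    rw [hKB]
    exact (perm_flatMap_congr _ _ _ (fun f _ => PySem.List.sorted_perm _ _ _)).trans
      (flatMap_buckets_perm cnt S fs hfs_nodup hmemfs)
  have hKBsorted : KB.Pairwise (ble cnt) := by
    rw [hKB]
    apply pairwise_flatMap
    · intro f _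
      apply List.Pairwise.imp_of_mem ?_ (PySem.List.sorted_pairwise _ _)
      intro a b ha hb hab
      have hfa : cnt a = f := by
        simpa using List.of_mem_filter ((PySem.List.mem_sorted _ _ _ a).mp ha)
      have hfb : cnt b = f := by
        simpa using List.of_mem_filter ((PySem.List.mem_sorted _ _ _ b).mp hb)
      exact Or.inr ⟨by rw [hfa, hfb], hab⟩
    · apply hfs_pairwise.imp
      intro f f' hlt a ha b hb
      have hfa : cnt a = f := by
        simpa using List.of_mem_filter ((PySem.List.mem_sorted _ _ _ a).mp ha)
      have hfb : cnt b = f' := by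
        simpa using List.of_mem_filter ((PySem.List.mem_sorted _ _ _ b).mp hb)
      exact Or.inl (by rw [hfa, hfb]; exact hlt)
  have hOKB : O = KB :=
    List.Perm.eq_of_pairwise (fun a b _ _ h1 h2 => ble_antisymm h1 h2)
      hOsorted hKBsorted (hOperm.trans hKBperm.symm)
  rw [hA, hB, hOKB]

-- ===== VERDICT (by name: the statement is the Claim_ definition above) =====
theorem solve_spec : Claim_equal_solve := by
  intro arr _
  unfold Spec_solve
  exact solve_eq arr
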